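-- pv_equiv track=rewrite | github.com/Sianuga/LinkQ-uniteSolve-2026 | backend/app/services/matching.py | _get_differences
-- ===== SOURCE A (Python) =====
-- from typing import Any, TypedDict
--
-- def _extract_set(user: dict, *keys: str) -> set[str]:
--     """Safely drill into nested dict and return a set of lowercase strings."""
--     obj: Any = user
--     for key in keys:
--         if isinstance(obj, dict):
--             obj = obj.get(key, [])
--         else:
--             return set()
--     if isinstance(obj, list):
--         return {str(item).lower().strip() for item in obj if item}
--     if isinstance(obj, str):
--         return {obj.lower().strip()} if obj.strip() else set()
--     return set()
--
-- def _get_differences(user_a: dict, user_b: dict) -> dict[str, list[str]]: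
--     """Return items that exist only in user_a (only_me) and only in user_b (only_them)."""
--     only_me: list[str] = []
--     only_them: list[str] = []
--
--     for category, *path in [
--         ("skills.programming", "skills", "programming"),
--         ("skills.languages", "skills", "languages"),
--         ("skills.tools", "skills", "tools"),
--         ("academic.courses", "academic", "courses"),
--         ("interests.hobbies", "interests", "hobbies"),
--         ("interests.topics", "interests", "topics"),
--     ]:
--         set_a = _extract_set(user_a, *path)
--         set_b = _extract_set(user_b, *path)
--         for item in sorted(set_a - set_b):
--             only_me.append(f"{category}: {item}")
--         for item in sorted(set_b - set_a):
--             only_them.append(f"{category}: {item}")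
--
--     return {"only_me": only_me, "only_them": only_them}
-- ===== SOURCE B (Python) =====
-- from typing import Any
--
--
-- def _extract_set(user: dict, *keys: str) -> set[str]:
--     """Safely drill into nested dict and return a set of lowercase strings."""
--     obj: Any = user
--     for key in keys:
--         if isinstance(obj, dict):
--             obj = obj.get(key, [])
--         else:
--             return set()
--     if isinstance(obj, list):
--         return {str(item).lower().strip() for item in obj if item}
--     if isinstance(obj, str):
--         return {obj.lower().strip()} if obj.strip() else set()
--     return set()
--
--
-- def _get_differences(user_a: dict, user_b: dict) -> dict[str, list[str]]:
--     """Return items that exist only in user_a (only_me) and only in user_b (only_them)."""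
--     only_me: list[str] = []
--     only_them: list[str] = []
--
--     for category, *path in [
--         ("skills.programming", "skills", "programming"),
--         ("skills.languages", "skills", "languages"),
--         ("skills.tools", "skills", "tools"),
--         ("academic.courses", "academic", "courses"),
--         ("interests.hobbies", "interests", "hobbies"),
--         ("interests.topics", "interests", "topics"),
--     ]:
--         # no set differences: merge the two sorted element lists with two
--         # pointers, routing unmatched elements and skipping common ones
--         la = sorted(_extract_set(user_a, *path))
--         lb = sorted(_extract_set(user_b, *path))
--         i = j = 0
--         while i < len(la) and j < len(lb):
--             if la[i] < lb[j]:
--                 only_me.append(f"{category}: {la[i]}")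
--                 i += 1
--             elif lb[j] < la[i]:
--                 only_them.append(f"{category}: {lb[j]}")
--                 j += 1
--             else:
--                 i += 1
--                 j += 1
--         while i < len(la):
--             only_me.append(f"{category}: {la[i]}")
--             i += 1
--         while j < len(lb):
--             only_them.append(f"{category}: {lb[j]}")
--             j += 1
--
--     return {"only_me": only_me, "only_them": only_them}
-- ===== Notes on version B (the rewrite author's own statement) =====
-- stated objective: alternative
-- what changed: Per category, the two sorted set differences are replaced by a two-pointer merge of the two sorted element lists, routing unmatched elements to only_me/only_them and skipping common ones, with no set-difference operation at all.
import Mathlib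
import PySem

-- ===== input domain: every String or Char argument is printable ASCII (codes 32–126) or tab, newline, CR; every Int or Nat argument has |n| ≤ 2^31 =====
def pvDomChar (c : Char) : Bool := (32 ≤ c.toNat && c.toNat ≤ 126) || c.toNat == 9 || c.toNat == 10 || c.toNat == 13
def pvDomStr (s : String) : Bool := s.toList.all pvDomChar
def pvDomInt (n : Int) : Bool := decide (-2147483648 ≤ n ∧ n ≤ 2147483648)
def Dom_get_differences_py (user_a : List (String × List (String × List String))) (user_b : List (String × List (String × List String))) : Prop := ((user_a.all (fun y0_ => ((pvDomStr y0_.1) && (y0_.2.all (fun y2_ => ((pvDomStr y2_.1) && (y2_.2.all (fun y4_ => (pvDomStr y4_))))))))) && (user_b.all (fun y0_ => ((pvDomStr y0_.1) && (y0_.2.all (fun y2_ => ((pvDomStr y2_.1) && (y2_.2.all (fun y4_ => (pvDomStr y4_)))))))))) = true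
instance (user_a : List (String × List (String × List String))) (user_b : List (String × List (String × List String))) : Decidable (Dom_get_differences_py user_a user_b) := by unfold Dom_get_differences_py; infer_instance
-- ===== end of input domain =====

-- B replaces the per-category sorted set differences by a two-pointer merge of the two
-- sorted element lists (no set difference at all) — an alternative algorithm, same cost.


-- ===== PORT A =====
-- shared helper: both Python sources contain this identical _extract_set, specialised to its
-- only call pattern (exactly two keys); values are dicts of lists per the type convention, so
-- the isinstance branches resolve statically: a missing first key yields [] (not a dict → set()).
def extractSet (user : List (String × List (String × List String))) (k1 k2 : String) : PySem.Set String :=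
  match (PySem.Dict.mk user).get? k1 with
  | none => PySem.Set.empty
  | some inner =>
      let l := (PySem.Dict.mk inner).getD k2 []
      PySem.Set.ofList ((l.filter (fun item => item ≠ "")).map
        (fun item => PySem.Str.strip (PySem.Str.lower item)))

def pvCats : List (String × String × String) :=
  [("skills.programming", "skills", "programming"),
   ("skills.languages", "skills", "languages"),
   ("skills.tools", "skills", "tools"),
   ("academic.courses", "academic", "courses"),
   ("interests.hobbies", "interests", "hobbies"),
   ("interests.topics", "interests", "topics")]

def get_differences_py (user_a : List (String × List (String × List String))) (user_b : List (String × List (String × List String))) : List (String × List String) :=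
  let r := pvCats.foldl (fun (acc : List String × List String) c =>
    let set_a := extractSet user_a c.2.1 c.2.2
    let set_b := extractSet user_b c.2.1 c.2.2
    let me := (PySem.List.sorted (PySem.Set.diff set_a set_b) (fun x => x) false).foldl
      (fun l item => l ++ [c.1 ++ ": " ++ item]) acc.1
    let them := (PySem.List.sorted (PySem.Set.diff set_b set_a) (fun x => x) false).foldl
      (fun l item => l ++ [c.1 ++ ": " ++ item]) acc.2
    (me, them)) ([], [])
  [("only_me", r.1), ("only_them", r.2)]

-- ===== PORT B =====
-- the two-pointer merge of Source B's while loops, as structural recursion on the two lists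
def mergeRoute (cat : String) : List String → List String → List String × List String
  | [], lb => ([], lb.map (fun y => cat ++ ": " ++ y))
  | x :: xs, [] => ((x :: xs).map (fun y => cat ++ ": " ++ y), [])
  | x :: xs, y :: ys =>
      if x < y then
        let r := mergeRoute cat xs (y :: ys)
        ((cat ++ ": " ++ x) :: r.1, r.2)
      else if y < x then
        let r := mergeRoute cat (x :: xs) ys
        (r.1, (cat ++ ": " ++ y) :: r.2)
      else mergeRoute cat xs ys
termination_by la lb => la.length + lb.length

def get_differences_py_alt (user_a : List (String × List (String × List String))) (user_b : List (String × List (String × List String))) : List (String × List String) :=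
  let r := pvCats.foldl (fun (acc : List String × List String) c =>
    let la := PySem.List.sorted (extractSet user_a c.2.1 c.2.2) (fun x => x) false
    let lb := PySem.List.sorted (extractSet user_b c.2.1 c.2.2) (fun x => x) false
    let m := mergeRoute c.1 la lb
    (acc.1 ++ m.1, acc.2 ++ m.2)) ([], [])
  [("only_me", r.1), ("only_them", r.2)]

-- ===== PRECONDITION & SPEC =====
def Spec_get_differences_py (user_a : List (String × List (String × List String))) (user_b : List (String × List (String × List String))) (out : List (String × List String)) : Prop := out = get_differences_py_alt user_a user_b
instance (user_a : List (String × List (String × List String))) (user_b : List (String × List (String × List String))) (out : List (String × List String)) : Decidable (Spec_get_differences_py user_a user_b out) := by unfold Spec_get_differences_py; infer_instance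

-- ===== CLAIM (what is proved, stated in full; the proofs are below) =====
def Claim_equal_get_differences_py : Prop := ∀ (user_a : List (String × List (String × List String))) (user_b : List (String × List (String × List String))), Dom_get_differences_py user_a user_b → Spec_get_differences_py user_a user_b (get_differences_py user_a user_b)

-- ===== LEMMAS AND PROOFS =====

theorem extractSet_nodup (user : List (String × List (String × List String))) (k1 k2 : String) :
    (extractSet user k1 k2).Nodup := by
  unfold extractSet
  cases (PySem.Dict.mk user).get? k1 with
  | none => exact List.nodup_nil
  | some inner => exact PySem.Set.nodup_ofList _

-- characterisation of the merge on strictly increasing inputs: it produces exactly the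
-- mapped one-sided "not a member of the other list" filters, in order
theorem mergeRoute_eq (cat : String) :
    ∀ (la lb : List String), la.Pairwise (· < ·) → lb.Pairwise (· < ·) →
      mergeRoute cat la lb
        = ((la.filter (fun x => !lb.contains x)).map (fun y => cat ++ ": " ++ y),
           (lb.filter (fun y => !la.contains y)).map (fun y => cat ++ ": " ++ y)) := by
  intro la lb
  induction la, lb using mergeRoute.induct cat with
  | case1 lb =>
      intro _ _
      simp [mergeRoute]
  | case2 x xs =>
      intro _ _
      simp [mergeRoute]
  | case3 x xs y ys hxy ih =>
      intro ha hb
      have hy : ∀ z ∈ y :: ys, x < z := by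
        intro z hz
        rcases List.mem_cons.1 hz with h | h
        · exact h ▸ hxy
        · exact lt_trans hxy (List.rel_of_pairwise_cons hb h)
      have hx_not : (y :: ys).contains x = false := by
        simp only [List.contains_eq_mem, decide_eq_false_iff_not]
        intro hmem
        exact absurd rfl (ne_of_lt (hy x hmem))
      have hfilt : (y :: ys).filter (fun z => !(x :: xs).contains z)
          = (y :: ys).filter (fun z => !xs.contains z) := by
        apply List.filter_congr
        intro z hz
        have : z ≠ x := ne_of_gt (hy z hz)
        simp [List.contains_eq_mem, this]
      rw [mergeRoute]
      simp only [if_pos hxy]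
      rw [ih (List.Pairwise.of_cons ha) hb, hfilt]
      have h2 : x ∉ ys := fun h => lt_irrefl x (hy x (List.mem_cons_of_mem _ h))
      simp [List.filter_cons, ne_of_lt hxy, h2]
  | case4 x xs y ys hxy hyx ih =>
      intro ha hb
      have hx : ∀ z ∈ x :: xs, y < z := by
        intro z hz
        rcases List.mem_cons.1 hz with h | h
        · exact h ▸ hyx
        · exact lt_trans hyx (List.rel_of_pairwise_cons ha h)
      have hy_not : (x :: xs).contains y = false := by
        simp only [List.contains_eq_mem, decide_eq_false_iff_not]
        intro hmem
        exact absurd rfl (ne_of_lt (hx y hmem))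
      have hfilt : (x :: xs).filter (fun z => !(y :: ys).contains z)
          = (x :: xs).filter (fun z => !ys.contains z) := by
        apply List.filter_congr
        intro z hz
        have : z ≠ y := ne_of_gt (hx z hz)
        simp [List.contains_eq_mem, this]
      rw [mergeRoute]
      simp only [if_neg (lt_asymm hyx), if_pos hyx]
      rw [ih ha (List.Pairwise.of_cons hb), hfilt]
      have h2 : y ∉ xs := fun h => lt_irrefl y (hx y (List.mem_cons_of_mem _ h))
      simp [List.filter_cons, ne_of_lt hyx, h2]
  | case5 x xs y ys hxy hyx ih =>
      intro ha hb
      have hexy : x = y := le_antisymm (le_of_not_gt hyx) (le_of_not_gt hxy)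
      subst hexy
      have hfa : (x :: xs).filter (fun z => !(x :: ys).contains z)
          = xs.filter (fun z => !ys.contains z) := by
        simp only [List.filter_cons]
        have : (x :: ys).contains x = true := by simp
        rw [this]
        simp only [Bool.not_true, if_neg Bool.false_ne_true]
        apply List.filter_congr
        intro z hz
        have : z ≠ x := ne_of_gt (List.rel_of_pairwise_cons ha hz)
        simp [List.contains_eq_mem, this]
      have hfb : (x :: ys).filter (fun z => !(x :: xs).contains z)
          = ys.filter (fun z => !xs.contains z) := by
        simp only [List.filter_cons]
        have : (x :: xs).contains x = true := by simp
        rw [this]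
        simp only [Bool.not_true, if_neg Bool.false_ne_true]
        apply List.filter_congr
        intro z hz
        have : z ≠ x := ne_of_gt (List.rel_of_pairwise_cons hb hz)
        simp [List.contains_eq_mem, this]
      rw [mergeRoute]
      simp only [if_neg hxy]
      rw [ih (List.Pairwise.of_cons ha) (List.Pairwise.of_cons hb), hfa, hfb]

-- sorted output of a Set is strictly increasing (the set has no duplicates)
theorem sorted_set_pairwise_lt (s : PySem.Set String) (hs : s.Nodup) :
    (PySem.List.sorted s (fun x => x) false).Pairwise (· < ·) := by
  have hnd : (PySem.List.sorted s (fun x => x) false).Nodup :=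
    ((PySem.List.sorted_perm _ _ _).nodup_iff).2 hs
  have hle := PySem.List.sorted_pairwise s (fun x => x)
  refine (hle.and hnd).imp ?_
  rintro a b ⟨h1, h2⟩
  exact lt_of_le_of_ne h1 h2

-- sorted(sa - sb) is the "not in sb" filter of sorted(sa)
theorem sorted_diff_eq_filter (sa sb : PySem.Set String) (ha : sa.Nodup) :
    PySem.List.sorted (PySem.Set.diff sa sb) (fun x => x) false
      = (PySem.List.sorted sa (fun x => x) false).filter (fun x => !sb.contains x) := by
  apply PySem.List.sorted_eq_of_perm_of_pairwise_lt
  · have hperm : ((PySem.List.sorted sa (fun x => x) false).filter (fun x => !sb.contains x)).Perm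
        (sa.filter (fun x => !sb.contains x)) := (PySem.List.sorted_perm _ _ _).filter _
    have heq : sa.filter (fun x => !sb.contains x) = PySem.Set.diff sa sb := by
      show _ = List.filter _ sa
      apply List.filter_congr
      intro x _
      simp [PySem.Set.contains_eq_listContains]
    exact heq ▸ hperm
  · exact (sorted_set_pairwise_lt sa ha).filter _

-- A's append loop is a map-append
theorem foldl_append_map (f : String → String) :
    ∀ (xs m : List String), xs.foldl (fun l item => l ++ [f item]) m = m ++ xs.map f := by
  intro xs
  induction xs with
  | nil => simp
  | cons x xs ih => intro m; simp [List.foldl_cons, ih, List.append_assoc]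

theorem step_eq (user_a user_b : List (String × List (String × List String)))
    (c : String × String × String) (acc : List String × List String) :
    (let set_a := extractSet user_a c.2.1 c.2.2
     let set_b := extractSet user_b c.2.1 c.2.2
     let me := (PySem.List.sorted (PySem.Set.diff set_a set_b) (fun x => x) false).foldl
       (fun l item => l ++ [c.1 ++ ": " ++ item]) acc.1
     let them := (PySem.List.sorted (PySem.Set.diff set_b set_a) (fun x => x) false).foldl
       (fun l item => l ++ [c.1 ++ ": " ++ item]) acc.2
     ((me, them) : List String × List String))
    = (let la := PySem.List.sorted (extractSet user_a c.2.1 c.2.2) (fun x => x) false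
       let lb := PySem.List.sorted (extractSet user_b c.2.1 c.2.2) (fun x => x) false
       let m := mergeRoute c.1 la lb
       (acc.1 ++ m.1, acc.2 ++ m.2)) := by
  simp only
  set sa := extractSet user_a c.2.1 c.2.2 with hsa
  set sb := extractSet user_b c.2.1 c.2.2 with hsb
  rw [mergeRoute_eq c.1 _ _
      (sorted_set_pairwise_lt sa (extractSet_nodup _ _ _))
      (sorted_set_pairwise_lt sb (extractSet_nodup _ _ _))]
  have hmemab : ∀ x, (PySem.List.sorted sb (fun x => x) false).contains x = sb.contains x := by
    intro x
    simp [List.contains_eq_mem, PySem.List.mem_sorted, PySem.Set.contains_eq_listContains]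
  have hmemba : ∀ x, (PySem.List.sorted sa (fun x => x) false).contains x = sa.contains x := by
    intro x
    simp [List.contains_eq_mem, PySem.List.mem_sorted, PySem.Set.contains_eq_listContains]
  simp only [hmemab, hmemba]
  rw [← sorted_diff_eq_filter sa sb (extractSet_nodup _ _ _),
      ← sorted_diff_eq_filter sb sa (extractSet_nodup _ _ _),
      foldl_append_map, foldl_append_map]

-- ===== VERDICT (by name: the statement is the Claim_ definition above) =====
theorem get_differences_py_spec : Claim_equal_get_differences_py := by
  intro user_a user_b _hdom
  unfold Spec_get_differences_py get_differences_py get_differences_py_alt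
  have : ∀ (cats : List (String × String × String)) (acc : List String × List String),
      cats.foldl (fun (acc : List String × List String) c =>
        let set_a := extractSet user_a c.2.1 c.2.2
        let set_b := extractSet user_b c.2.1 c.2.2
        let me := (PySem.List.sorted (PySem.Set.diff set_a set_b) (fun x => x) false).foldl
          (fun l item => l ++ [c.1 ++ ": " ++ item]) acc.1
        let them := (PySem.List.sorted (PySem.Set.diff set_b set_a) (fun x => x) false).foldl
          (fun l item => l ++ [c.1 ++ ": " ++ item]) acc.2
        (me, them)) acc
      = cats.foldl (fun (acc : List String × List String) c =>
        let la := PySem.List.sorted (extractSet user_a c.2.1 c.2.2) (fun x => x) false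
        let lb := PySem.List.sorted (extractSet user_b c.2.1 c.2.2) (fun x => x) false
        let m := mergeRoute c.1 la lb
        (acc.1 ++ m.1, acc.2 ++ m.2)) acc := by
    intro cats
    induction cats with
    | nil => intro acc; rfl
    | cons c cats ih =>
        intro acc
        simp only [List.foldl_cons]
        rw [step_eq user_a user_b c acc]
        exact ih _
  rw [this]
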